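-- pv_equiv track=rewrite | github.com/PastIsJustPast/AlgorithmStudy | 2주차/1826/1826_연료_채우기_김원호.py | get_max_fuel_idx
-- ===== SOURCE A (Python) =====
-- def get_max_fuel_idx(stations, dist_limit):
--     max_idx = -1
--     max_fuel = -1
--     for idx, station in enumerate(stations):
--         dist, fuel = station
--         if dist > dist_limit:
--             return max_idx
--         if fuel > max_fuel:
--             max_idx = idx
--             max_fuel = fuel
--     return max_idx
-- ===== SOURCE B (Python) =====
-- def get_max_fuel_idx(stations, dist_limit):
--     cut = next((i for i, (d, _) in enumerate(stations) if d > dist_limit), len(stations))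
--     fuels = [f for _, f in stations[:cut]]
--     best = max(fuels, default=-1)
--     return fuels.index(best) if best > -1 else -1
-- ===== Notes on version B (the rewrite author's own statement) =====
-- stated objective: simpler
-- what changed: A interleaves the distance cutoff with a running argmax in one stateful loop; B decomposes the task into three plain steps: find the cutoff index, take the fuel prefix, then max + first-index lookup (returning -1 when the prefix is empty or its maximum fuel is <= -1, exactly A's sentinel behaviour).
import Mathlib
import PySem

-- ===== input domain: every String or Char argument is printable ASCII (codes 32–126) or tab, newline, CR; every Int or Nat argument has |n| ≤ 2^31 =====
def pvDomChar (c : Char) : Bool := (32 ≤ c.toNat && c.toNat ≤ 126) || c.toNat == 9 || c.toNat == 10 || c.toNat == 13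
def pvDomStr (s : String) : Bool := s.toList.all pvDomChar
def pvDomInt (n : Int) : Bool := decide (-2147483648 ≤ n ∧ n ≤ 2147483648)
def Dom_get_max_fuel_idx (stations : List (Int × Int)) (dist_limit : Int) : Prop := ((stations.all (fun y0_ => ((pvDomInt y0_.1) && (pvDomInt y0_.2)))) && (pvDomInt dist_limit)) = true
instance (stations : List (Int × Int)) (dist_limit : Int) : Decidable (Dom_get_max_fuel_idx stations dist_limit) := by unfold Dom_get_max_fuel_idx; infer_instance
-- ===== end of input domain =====

-- B replaces A's single stateful loop (early return + running argmax) by a three-step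
-- decomposition: cutoff index, fuel prefix, max + first-index lookup; same O(n) cost, plainer structure.

-- ===== PORT A =====
def getMaxFuelGo : List (Int × Int) → Int → Int → Int → Int → Int
  | [], _, _, max_idx, _ => max_idx
  | (dist, fuel) :: rest, dist_limit, idx, max_idx, max_fuel =>
    if dist > dist_limit then max_idx
    else if fuel > max_fuel then getMaxFuelGo rest dist_limit (idx + 1) idx fuel
    else getMaxFuelGo rest dist_limit (idx + 1) max_idx max_fuel

def get_max_fuel_idx (stations : List (Int × Int)) (dist_limit : Int) : Int :=
  getMaxFuelGo stations dist_limit 0 (-1) (-1)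

-- ===== PORT B =====
def get_max_fuel_idx_alt (stations : List (Int × Int)) (dist_limit : Int) : Int :=
  -- cut = next((i for i, (d, _) in enumerate(stations) if d > dist_limit), len(stations))
  let cut : Nat := stations.findIdx (fun s => decide (s.1 > dist_limit))
  -- fuels = [f for _, f in stations[:cut]]
  let fuels : List Int := (PySem.List.slice stations none (some (cut : Int))).map Prod.snd
  -- best = max(fuels, default=-1)
  let best : Int := (PySem.List.max? fuels (fun x => x)).getD (-1)
  -- fuels.index(best) if best > -1 else -1   (index never raises: best ∈ fuels whenever best > -1)
  if best > -1 then (((PySem.List.index? fuels best).getD 0 : Nat) : Int) else -1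

-- ===== PRECONDITION & SPEC =====
def Spec_get_max_fuel_idx (stations : List (Int × Int)) (dist_limit : Int) (out : Int) : Prop := out = get_max_fuel_idx_alt stations dist_limit
instance (stations : List (Int × Int)) (dist_limit : Int) (out : Int) : Decidable (Spec_get_max_fuel_idx stations dist_limit out) := by unfold Spec_get_max_fuel_idx; infer_instance

-- ===== CLAIM (what is proved, stated in full; the proofs are below) =====
def Claim_equal_get_max_fuel_idx : Prop := ∀ (stations : List (Int × Int)) (dist_limit : Int), Dom_get_max_fuel_idx stations dist_limit → Spec_get_max_fuel_idx stations dist_limit (get_max_fuel_idx stations dist_limit)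

-- ===== LEMMAS AND PROOFS =====

/-- A's loop over the fuel values only (distance cutoff already applied). Proof-only helper. -/
def pvGoF : List Int → Int → Int → Int → Int
  | [], _, max_idx, _ => max_idx
  | f :: rest, idx, max_idx, max_fuel =>
    if f > max_fuel then pvGoF rest (idx + 1) idx f
    else pvGoF rest (idx + 1) max_idx max_fuel

theorem goA_eq_goF (stations : List (Int × Int)) (dist_limit idx max_idx max_fuel : Int) :
    getMaxFuelGo stations dist_limit idx max_idx max_fuel =
      pvGoF ((stations.take (stations.findIdx (fun s => decide (s.1 > dist_limit)))).map Prod.snd)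
        idx max_idx max_fuel := by
  induction stations generalizing idx max_idx max_fuel with
  | nil => simp [getMaxFuelGo, pvGoF]
  | cons hd tl ih =>
    obtain ⟨d, f⟩ := hd
    by_cases hd : d > dist_limit
    · simp [getMaxFuelGo, List.findIdx_cons, hd, pvGoF]
    · by_cases hf : f > max_fuel <;>
        simp [getMaxFuelGo, List.findIdx_cons, hd, pvGoF, hf, ih]

theorem foldl_max_pull (l : List Int) (a b : Int) :
    l.foldl max (max a b) = max a (l.foldl max b) := by
  induction l generalizing b with
  | nil => rfl
  | cons c t ih => simp only [List.foldl_cons, max_assoc, ih]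

theorem goF_char (fuels : List Int) (idx max_idx max_fuel : Int) :
    pvGoF fuels idx max_idx max_fuel =
      match PySem.List.max? fuels (fun x => x) with
      | none => max_idx
      | some m => if m > max_fuel then idx + (((PySem.List.index? fuels m).getD 0 : Nat) : Int)
                  else max_idx := by
  induction fuels generalizing idx max_idx max_fuel with
  | nil => simp [pvGoF, PySem.List.max?]
  | cons f t ih =>
    rcases t with _ | ⟨x, t'⟩
    · by_cases hf : f > max_fuel <;>
        simp [pvGoF, PySem.List.max?_id_cons, hf]
    · have hm2 : PySem.List.max? (x :: t') (fun y => y) = some (t'.foldl max x) :=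
        PySem.List.max?_id_cons x t'
      have hmem : t'.foldl max x ∈ x :: t' := by
        rcases PySem.List.foldl_max_mem t' x with h | h
        · rw [h]; exact List.mem_cons_self
        · exact List.mem_cons_of_mem _ h
      obtain ⟨k, hk⟩ : ∃ k, PySem.List.index? (x :: t') (t'.foldl max x) = some k := by
        rw [← Option.isSome_iff_exists, PySem.List.index?_isSome_iff]; exact hmem
      have hMax : PySem.List.max? (f :: x :: t') (fun y => y)
          = some (max f (t'.foldl max x)) := by
        rw [PySem.List.max?_id_cons]
        simp [List.foldl_cons, foldl_max_pull]
      have hstep : pvGoF (f :: x :: t') idx max_idx max_fuel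
          = if f > max_fuel then pvGoF (x :: t') (idx + 1) idx f
            else pvGoF (x :: t') (idx + 1) max_idx max_fuel := rfl
      by_cases hgt : t'.foldl max x > f
      · have hmax_eq : max f (t'.foldl max x) = t'.foldl max x := max_eq_right (le_of_lt hgt)
        have hne : f ≠ t'.foldl max x := ne_of_lt hgt
        have hidx : PySem.List.index? (f :: x :: t') (t'.foldl max x) = some (k + 1) := by
          rw [PySem.List.index?_cons_of_ne _ hne, hk]; rfl
        by_cases hf : f > max_fuel
        · have hM : t'.foldl max x > max_fuel := lt_trans hf hgt
          rw [hstep, if_pos hf, ih, hm2, hMax]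
          simp only [hmax_eq, hidx, hk, Option.getD_some, if_pos hgt, if_pos hM]
          push_cast; ring
        · by_cases hM : t'.foldl max x > max_fuel
          · rw [hstep, if_neg hf, ih, hm2, hMax]
            simp only [hmax_eq, hidx, hk, Option.getD_some, if_pos hM]
            push_cast; ring
          · rw [hstep, if_neg hf, ih, hm2, hMax]
            simp only [hmax_eq, if_neg hM]
      · have hmax_eq : max f (t'.foldl max x) = f := max_eq_left (not_lt.mp hgt)
        have hidx : PySem.List.index? (f :: x :: t') f = some 0 :=
          PySem.List.index?_cons_self f (x :: t')
        by_cases hf : f > max_fuel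
        · rw [hstep, if_pos hf, ih, hm2, hMax]
          simp only [hmax_eq, hidx, Option.getD_some, if_neg hgt, if_pos hf]
          push_cast; ring
        · have hM : ¬ t'.foldl max x > max_fuel :=
            fun h => hgt (lt_of_le_of_lt (not_lt.mp hf) h)
          rw [hstep, if_neg hf, ih, hm2, hMax]
          simp only [hmax_eq, if_neg hM, if_neg hf]

-- ===== VERDICT (by name: the statement is the Claim_ definition above) =====
theorem get_max_fuel_idx_spec : Claim_equal_get_max_fuel_idx := by
  intro stations dist_limit _
  unfold Spec_get_max_fuel_idx get_max_fuel_idx get_max_fuel_idx_alt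
  rw [goA_eq_goF, goF_char]
  simp only [PySem.List.slice_to_natCast]
  cases hmax : PySem.List.max?
      ((stations.take (stations.findIdx fun s => decide (s.1 > dist_limit))).map Prod.snd)
      (fun x => x) with
  | none => simp
  | some m =>
    simp only [Option.getD_some]
    by_cases hm : m > -1 <;> simp [hm]
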